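-- pv_equiv track=rewrite | github.com/PhyloSofS-Team/thoraxe | thoraxe/subexons/rescue.py | get_unaligned_regions
-- ===== SOURCE A (Python) =====
-- def get_unaligned_regions(seq_i, seq_j, minimum_len=4):
--     """
--     Return the ungapped regions in `seq_j` that do not align with `seq_i`.
--
--     Returned regions should have at least `minimum_len`.
--
--     >>> seq_i = '------MHKCLVDE------YTEDQGGFRK------'
--     >>> seq_j = 'MLLHYHHHKC-------LMCYTRDLHG---IH-L-K'
--     >>> get_unaligned_regions(seq_i, seq_j)
--     ['MLLHYH', 'IHLK']
--     >>> seq_i = 'XXXXXXXXXXMHKCLVDE------YTEDQGGFRK'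
--     >>> seq_j = '----MLLHYHHHKC-------LMCYTRDLHG---'
--     >>> get_unaligned_regions(seq_i, seq_j)
--     ['MLLHYH']
--     >>> seq_i = 'XXXXXXXXXXMHKCLVDE------YTEDQGGFRK'
--     >>> seq_j = '----MLLHYHHHKC-----XXLMCYTRDLHG---'
--     >>> get_unaligned_regions(seq_i, seq_j)
--     ['MLLHYH', 'XXLMC']
--     """
--     j_sequences = []
--     j_region = []
--     in_region = False
--     for (res_i, res_j) in zip(seq_i, seq_j):
--         if res_i in {'-', 'X'}:
--             in_region = True
--             if res_j != '-':
--                 j_region.append(res_j)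
--         elif in_region:
--             seq = ''.join(j_region)
--             j_region.clear()
--             in_region = False
--             if len(seq) >= minimum_len:
--                 j_sequences.append(seq)
--
--     seq = ''.join(j_region)
--     if len(seq) >= minimum_len:
--         j_sequences.append(seq)
--
--     return j_sequences
-- ===== SOURCE B (Python) =====
-- def get_unaligned_regions(seq_i, seq_j, minimum_len=4):
--     """Run-scanning rewrite: consume each maximal gap/X run of seq_i with a
--     two-pointer scan instead of a per-character state machine with an in_region flag."""
--     out = []
--     pairs = list(zip(seq_i, seq_j))
--     n = len(pairs)
--     i = 0
--     while i < n:
--         if pairs[i][0] in ('-', 'X'):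
--             k = i + 1
--             while k < n and pairs[k][0] in ('-', 'X'):
--                 k += 1
--             s = ''.join(cj for _, cj in pairs[i:k] if cj != '-')
--             if len(s) >= minimum_len:
--                 out.append(s)
--             i = k
--         else:
--             i += 1
--     return out
-- ===== Notes on version B (the rewrite author's own statement) =====
-- stated objective: alternative
-- what changed: Replaces A's per-character state machine (in_region flag, mutable region buffer, exit-time and trailing flushes) with a run-scanning loop that consumes each maximal gap/X run of seq_i in one inner scan and emits its region immediately.
-- intended difference: When minimum_len <= 0 and the (truncated) alignment does not end inside a gap/X run of seq_i (including empty input), A's unconditional final flush appends a spurious empty-string region '' while B returns only the real gap-run regions; the empty string is not a region of seq_j, so B's value is the intended one. — e.g. on get_unaligned_regions("A", "B", 0): A returns [""], B returns []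
import Mathlib
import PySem

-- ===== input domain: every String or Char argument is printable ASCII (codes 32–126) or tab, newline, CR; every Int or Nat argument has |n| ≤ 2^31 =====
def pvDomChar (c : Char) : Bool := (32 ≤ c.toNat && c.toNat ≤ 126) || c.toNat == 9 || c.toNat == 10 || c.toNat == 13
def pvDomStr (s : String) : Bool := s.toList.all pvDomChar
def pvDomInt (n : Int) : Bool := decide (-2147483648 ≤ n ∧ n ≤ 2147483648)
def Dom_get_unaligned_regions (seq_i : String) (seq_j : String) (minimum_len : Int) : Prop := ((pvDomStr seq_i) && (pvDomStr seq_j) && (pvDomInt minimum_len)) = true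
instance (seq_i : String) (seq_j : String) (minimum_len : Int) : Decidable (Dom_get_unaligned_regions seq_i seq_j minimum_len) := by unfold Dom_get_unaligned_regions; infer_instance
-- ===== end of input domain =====

-- B rewrites A's per-character in_region state machine as a run-scanning loop (consume each
-- maximal gap/X run in one inner scan); same cost, different decomposition ("alternative").
-- On minimum_len ≤ 0 with the alignment not ending in a gap/X run, A's unconditional final
-- flush appends a spurious "" region; B intentionally does not (see D_ below).

-- ===== PORT A =====
def pvGap (c : Char) : Bool := c == '-' || c == 'X'

def pvLoopA (m : Int) : List (Char × Char) → List String → List Char → Bool → List String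
  | [], j_sequences, j_region, _in_region =>
      let seq := String.ofList j_region
      if m ≤ (seq.length : Int) then j_sequences ++ [seq] else j_sequences
  | (res_i, res_j) :: rest, j_sequences, j_region, in_region =>
      if pvGap res_i then
        pvLoopA m rest j_sequences (if res_j != '-' then j_region ++ [res_j] else j_region) true
      else if in_region then
        let seq := String.ofList j_region
        pvLoopA m rest (if m ≤ (seq.length : Int) then j_sequences ++ [seq] else j_sequences) [] false
      else
        pvLoopA m rest j_sequences j_region in_region

def get_unaligned_regions (seq_i : String) (seq_j : String) (minimum_len : Int) : List String :=
  pvLoopA minimum_len (seq_i.toList.zip seq_j.toList) [] [] false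

-- ===== PORT B =====
-- inner `while k < n and pairs[k][0] in ('-','X'): k += 1`; the fuel argument only
-- bounds the iteration count (n is always enough), keeping the recursion structural
def pvRunEnd (pairs : List (Char × Char)) (n : Nat) : Nat → Nat → Nat
  | 0, k => k
  | fuel + 1, k =>
      if k < n ∧ pvGap (pairs.getD k (' ', ' ')).1 = true then pvRunEnd pairs n fuel (k + 1) else k

-- ''.join(cj for _, cj in run if cj != '-')
def pvFilt (l : List (Char × Char)) : List Char :=
  l.filterMap (fun q => if q.2 != '-' then some q.2 else none)

-- outer `while i < n` two-pointer loop accumulating into `out`; fuel = n bounds the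
-- number of iterations (i strictly increases), keeping the recursion structural
def pvLoopB (m : Int) (pairs : List (Char × Char)) (n : Nat) : Nat → Nat → List String → List String
  | 0, _, out => out
  | fuel + 1, i, out =>
      if i < n then
        if pvGap (pairs.getD i (' ', ' ')).1 then
          let k := pvRunEnd pairs n n (i + 1)
          let s := String.ofList (pvFilt ((pairs.drop i).take (k - i)))
          pvLoopB m pairs n fuel k (if m ≤ (s.length : Int) then out ++ [s] else out)
        else
          pvLoopB m pairs n fuel (i + 1) out
      else out

def get_unaligned_regions_alt (seq_i : String) (seq_j : String) (minimum_len : Int) : List String :=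
  pvLoopB minimum_len (seq_i.toList.zip seq_j.toList) (seq_i.toList.zip seq_j.toList).length
    (seq_i.toList.zip seq_j.toList).length 0 []

-- ===== PRECONDITION & SPEC =====
-- On minimum_len ≤ 0 when the (truncated) alignment does not end inside a gap/X run of seq_i,
-- A's unconditional final flush appends a spurious empty-string region; B returns only the real
-- gap-run regions, which is the intended value (the empty string is not a region of seq_j).
def pvTailGapL (a : List Char) (b : List Char) : Bool :=
  let n := min a.length b.length
  decide (n ≠ 0) && pvGap (a.getD (n - 1) ' ')

def D_get_unaligned_regions (seq_i : String) (seq_j : String) (minimum_len : Int) : Prop :=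
  minimum_len ≤ 0 ∧ pvTailGapL seq_i.toList seq_j.toList = false
instance (seq_i : String) (seq_j : String) (minimum_len : Int) : Decidable (D_get_unaligned_regions seq_i seq_j minimum_len) := by unfold D_get_unaligned_regions; infer_instance

def Spec_get_unaligned_regions (seq_i : String) (seq_j : String) (minimum_len : Int) (out : List String) : Prop := ¬ D_get_unaligned_regions seq_i seq_j minimum_len → out = get_unaligned_regions_alt seq_i seq_j minimum_len
instance (seq_i : String) (seq_j : String) (minimum_len : Int) (out : List String) : Decidable (Spec_get_unaligned_regions seq_i seq_j minimum_len out) := by unfold Spec_get_unaligned_regions; infer_instance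

def pvDiffWitness_get_unaligned_regions : String × String × Int := ("A", "B", 0)
def pvDiffWitnessOut_get_unaligned_regions : (List String) × (List String) := ([""], [])

-- ===== CLAIM (what is proved, stated in full; the proofs are below) =====
def Claim_unchanged_get_unaligned_regions : Prop := ∀ (seq_i : String) (seq_j : String) (minimum_len : Int), Dom_get_unaligned_regions seq_i seq_j minimum_len → Spec_get_unaligned_regions seq_i seq_j minimum_len (get_unaligned_regions seq_i seq_j minimum_len)
def Claim_changed_get_unaligned_regions : Prop := Dom_get_unaligned_regions (pvDiffWitness_get_unaligned_regions.1) (pvDiffWitness_get_unaligned_regions.2.1) (pvDiffWitness_get_unaligned_regions.2.2) ∧ D_get_unaligned_regions (pvDiffWitness_get_unaligned_regions.1) (pvDiffWitness_get_unaligned_regions.2.1) (pvDiffWitness_get_unaligned_regions.2.2) ∧ get_unaligned_regions (pvDiffWitness_get_unaligned_regions.1) (pvDiffWitness_get_unaligned_regions.2.1) (pvDiffWitness_get_unaligned_regions.2.2) = pvDiffWitnessOut_get_unaligned_regions.1 ∧ get_unaligned_regions_alt (pvDiffWitness_get_unaligned_regions.1) (pvDiffWitness_get_unaligned_regions.2.1)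 (pvDiffWitness_get_unaligned_regions.2.2) = pvDiffWitnessOut_get_unaligned_regions.2 ∧ pvDiffWitnessOut_get_unaligned_regions.1 ≠ pvDiffWitnessOut_get_unaligned_regions.2
def Claim_exact_get_unaligned_regions : Prop := ∀ (seq_i : String) (seq_j : String) (minimum_len : Int), Dom_get_unaligned_regions seq_i seq_j minimum_len → D_get_unaligned_regions seq_i seq_j minimum_len → get_unaligned_regions seq_i seq_j minimum_len ≠ get_unaligned_regions_alt seq_i seq_j minimum_len

-- ===== LEMMAS AND PROOFS =====

-- length of the leading run of gap/X pairs
def pvRunLen : List (Char × Char) → Nat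
  | [] => 0
  | p :: t => if pvGap p.1 then 1 + pvRunLen t else 0

-- proof-side restatement of B's loop that consumes the list from the front
def pvConsume (m : Int) : List (Char × Char) → List String → List String
  | [], out => out
  | p :: t, out =>
      if pvGap p.1 then
        let k := 1 + pvRunLen t
        let s := String.ofList (pvFilt ((p :: t).take k))
        pvConsume m ((p :: t).drop k) (if m ≤ (s.length : Int) then out ++ [s] else out)
      else
        pvConsume m t out
  termination_by l _ => l.length
  decreasing_by
  · simp [List.length_drop]
  · simp

-- whether the zipped alignment ends with a gap/X pair
def pvEndsGapL (l : List (Char × Char)) : Bool :=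
  match l.getLast? with
  | some p => pvGap p.1
  | none => false

-- the spurious final flush A performs beyond B
def pvQ (m : Int) (l : List (Char × Char)) : List String :=
  if pvEndsGapL l then [] else if m ≤ 0 then [""] else []

theorem pvLoopA_acc (m : Int) (l : List (Char × Char)) : ∀ (acc : List String) (r : List Char) (inr : Bool),
    pvLoopA m l acc r inr = acc ++ pvLoopA m l [] r inr := by
  induction l with
  | nil =>
    intro acc r inr
    simp only [pvLoopA]
    split <;> simp
  | cons p t ih =>
    intro acc r inr
    obtain ⟨ri, rj⟩ := p
    simp only [pvLoopA]
    by_cases hg : pvGap ri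
    · simp only [hg, if_true]
      exact ih _ _ _
    · simp only [hg, Bool.false_eq_true, if_false]
      cases inr with
      | false => exact ih _ _ _
      | true =>
        simp only []
        rw [ih, ih (if m ≤ ((String.ofList r).length : Int) then [] ++ [String.ofList r] else [])]
        by_cases hc : m ≤ (r.length : Int) <;> simp [hc]

theorem pvConsume_acc (m : Int) : ∀ (n : Nat) (l : List (Char × Char)), l.length ≤ n → ∀ (out : List String),
    pvConsume m l out = out ++ pvConsume m l [] := by
  intro n
  induction n with
  | zero =>
    intro l h out
    have hl : l = [] := by cases l <;> simp_all
    subst hl; simp [pvConsume]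
  | succ n ih =>
    intro l h out
    cases l with
    | nil => simp [pvConsume]
    | cons p t =>
      simp only [pvConsume]
      by_cases hg : pvGap p.1
      · simp only [hg, if_true]
        have hlen : ((p :: t).drop (1 + pvRunLen t)).length ≤ n := by
          simp only [List.length_drop] at *
          simp at h ⊢; omega
        rw [ih _ hlen, ih _ hlen (if m ≤ ((String.ofList (pvFilt ((p :: t).take (1 + pvRunLen t)))).length : Int) then [] ++ [String.ofList (pvFilt ((p :: t).take (1 + pvRunLen t)))] else [])]
        by_cases hc : m ≤ ((pvFilt ((p :: t).take (1 + pvRunLen t))).length : Int) <;> simp [hc]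
      · simp only [hg, Bool.false_eq_true, if_false]
        exact ih t (by simp at h; omega) out

theorem pvEndsGap_cons (p : Char × Char) (t : List (Char × Char)) :
    pvEndsGapL (p :: t) = if t = [] then pvGap p.1 else pvEndsGapL t := by
  cases t <;> simp [pvEndsGapL]

theorem pvDrop_runLen_head (l : List (Char × Char)) : ∀ x t', l.drop (pvRunLen l) = x :: t' → pvGap x.1 = false := by
  induction l with
  | nil => intro x t' h; simp [pvRunLen] at h
  | cons p t ih =>
    intro x t' h
    by_cases hg : pvGap p.1
    · simp only [pvRunLen, hg, if_true, List.drop_succ_cons, Nat.add_comm 1] at h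
      exact ih x t' (by simpa using h)
    · simp only [pvRunLen, hg, Bool.false_eq_true, if_false, List.drop_zero] at h
      cases h; simpa using hg

theorem pvAllGap_ends (t : List (Char × Char)) : ∀ p, pvGap p.1 = true → t.drop (pvRunLen t) = [] → pvEndsGapL (p :: t) = true := by
  induction t with
  | nil => intro p hp _; simp [pvEndsGapL, hp]
  | cons q t' ih =>
    intro p hp h
    by_cases hg : pvGap q.1
    · simp only [pvRunLen, hg, if_true, Nat.add_comm 1, List.drop_succ_cons] at h
      rw [pvEndsGap_cons]
      simpa using ih q hg h
    · simp [pvRunLen, hg] at h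

theorem pvEndsGap_drop : ∀ (l : List (Char × Char)) (n : Nat), l.drop n ≠ [] → pvEndsGapL (l.drop n) = pvEndsGapL l := by
  intro l
  induction l with
  | nil => intro n h; simp at h
  | cons p t ih =>
    intro n h
    cases n with
    | zero => rfl
    | succ n =>
      simp only [List.drop_succ_cons] at h ⊢
      rw [ih n h, pvEndsGap_cons]
      have : t ≠ [] := by intro he; subst he; simp at h
      simp [this]

theorem pvLoopA_run (m : Int) : ∀ (l : List (Char × Char)) (r : List Char),
    pvLoopA m l [] r true =
      (if m ≤ ((String.ofList (r ++ pvFilt (l.take (pvRunLen l)))).length : Int)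
        then [String.ofList (r ++ pvFilt (l.take (pvRunLen l)))] else [])
      ++ (match l.drop (pvRunLen l) with
          | [] => []
          | _ :: t' => pvLoopA m t' [] [] false) := by
  intro l
  induction l with
  | nil =>
    intro r
    simp [pvLoopA, pvRunLen, pvFilt]
  | cons p t ih =>
    intro r
    obtain ⟨ri, rj⟩ := p
    by_cases hg : pvGap ri
    · have h1 : pvRunLen ((ri, rj) :: t) = 1 + pvRunLen t := by simp [pvRunLen, hg]
      simp only [pvLoopA, hg, if_true, h1, Nat.add_comm 1, List.take_succ_cons, List.drop_succ_cons]
      rw [ih]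
      by_cases hj : rj != '-' <;>
        simp only [hj, if_true, Bool.false_eq_true, if_false, pvFilt, List.filterMap_cons, List.append_assoc, List.singleton_append]
    · simp only [pvLoopA, hg, Bool.false_eq_true, if_false, if_true, pvRunLen, List.take_zero, List.drop_zero]
      rw [pvLoopA_acc]
      simp [pvFilt]

theorem pvMain (m : Int) : ∀ (n : Nat) (l : List (Char × Char)), l.length ≤ n →
    pvLoopA m l [] [] false = pvConsume m l [] ++ pvQ m l := by
  intro n
  induction n with
  | zero =>
    intro l h
    have hl : l = [] := by cases l <;> simp_all
    subst hl
    simp [pvLoopA, pvConsume, pvQ, pvEndsGapL]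
  | succ n ih =>
    intro l h
    cases l with
    | nil => simp [pvLoopA, pvConsume, pvQ, pvEndsGapL]
    | cons p t =>
      by_cases hg : pvGap p.1
      · -- A enters a region
        have hA : pvLoopA m (p :: t) [] [] false
            = pvLoopA m t [] (if p.2 != '-' then [] ++ [p.2] else []) true := by
          obtain ⟨ri, rj⟩ := p
          simp only [pvLoopA]
          simp only [hg, if_true]
        rw [hA, pvLoopA_run]
        have hfilt : (if p.2 != '-' then ([] : List Char) ++ [p.2] else []) ++ pvFilt (t.take (pvRunLen t))
            = pvFilt ((p :: t).take (1 + pvRunLen t)) := by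
          by_cases hj : p.2 = '-' <;>
            simp [hj, pvFilt, Nat.add_comm 1]
        have hB : pvConsume m (p :: t) []
            = (if m ≤ ((String.ofList (pvFilt ((p :: t).take (1 + pvRunLen t)))).length : Int)
                then [String.ofList (pvFilt ((p :: t).take (1 + pvRunLen t)))] else [])
              ++ pvConsume m (t.drop (pvRunLen t)) [] := by
          simp only [pvConsume, hg, if_true]
          rw [pvConsume_acc m (t.drop (pvRunLen t)).length _ (by simp [Nat.add_comm 1])]
          simp [Nat.add_comm 1]
        rw [hB, hfilt]
        cases hd : t.drop (pvRunLen t) with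
        | nil =>
          have hq : pvQ m (p :: t) = [] := by
            simp [pvQ, pvAllGap_ends t p hg hd]
          simp [hq, pvConsume]
        | cons x t' =>
          have hx : pvGap x.1 = false := pvDrop_runLen_head t x t' hd
          have ht' : t'.length ≤ n := by
            have := congrArg List.length hd
            simp [List.length_drop] at this
            simp at h
            omega
          have hBx : pvConsume m (x :: t') [] = pvConsume m t' [] := by
            simp [pvConsume, hx]
          have hq : pvQ m (p :: t) = pvQ m t' := by
            have htne : t ≠ [] := by
              intro he; subst he; simp [pvRunLen] at hd
            have hdne : t.drop (pvRunLen t) ≠ [] := by simp [hd]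
            have h1 : pvEndsGapL (p :: t) = pvEndsGapL t := by
              rw [pvEndsGap_cons]; simp [htne]
            have h2 : pvEndsGapL t = pvEndsGapL (x :: t') := by
              rw [← hd, pvEndsGap_drop t (pvRunLen t) hdne]
            cases t'' : t' with
            | nil =>
              subst t''
              have hx0 : pvEndsGapL (x :: ([] : List (Char × Char))) = false := by
                simp [pvEndsGapL, hx]
              have hfalse : pvEndsGapL (p :: t) = false := by rw [h1, h2, hx0]
              have hnil : pvEndsGapL ([] : List (Char × Char)) = false := by simp [pvEndsGapL]
              simp [pvQ, hfalse, hnil]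
            | cons y u =>
              have h3 : pvEndsGapL (x :: y :: u) = pvEndsGapL (y :: u) := by
                rw [pvEndsGap_cons]; simp
              have hfin : pvEndsGapL (p :: t) = pvEndsGapL (y :: u) := by
                rw [h1, h2, t'', h3]
              simp [pvQ, hfin]
          have hm : (match x :: t' with
              | [] => ([] : List String)
              | _ :: t'' => pvLoopA m t'' [] [] false) = pvLoopA m t' [] [] false := rfl
          rw [hm, ih t' ht', hBx, hq]
          simp
      · -- A skips a non-region column
        have hA : pvLoopA m (p :: t) [] [] false = pvLoopA m t [] [] false := by
          obtain ⟨ri, rj⟩ := p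
          simp only [pvLoopA]
          simp [hg]
        have hB : pvConsume m (p :: t) [] = pvConsume m t [] := by
          simp [pvConsume, hg]
        have hq : pvQ m (p :: t) = pvQ m t := by
          cases t with
          | nil => simp [pvQ, pvEndsGapL, hg]
          | cons y u => rw [pvQ, pvQ, pvEndsGap_cons]; simp
        rw [hA, hB, hq, ih t (by simp at h; omega)]

theorem pvZip_tailGap : ∀ (a : List Char) (b : List Char), pvEndsGapL (a.zip b) = pvTailGapL a b := by
  intro a
  induction a with
  | nil => intro b; simp [pvEndsGapL, pvTailGapL]
  | cons x a' ih =>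
    intro b
    cases b with
    | nil => simp [pvEndsGapL, pvTailGapL]
    | cons y b' =>
      simp only [List.zip_cons_cons]
      rw [pvEndsGap_cons, ih]
      have hlen : min (x :: a').length (y :: b').length = min a'.length b'.length + 1 := by
        simp [List.length_cons, Nat.succ_min_succ]
      by_cases hz : a'.zip b' = []
      · have hor : a' = [] ∨ b' = [] := by
          cases a' <;> cases b' <;> simp_all
        have hmin : min a'.length b'.length = 0 := by
          rcases hor with h | h <;> simp [h]
        simp [hz, pvTailGapL, hmin]
      · have hne1 : a' ≠ [] := by intro he; subst he; simp at hz
        have hne2 : b' ≠ [] := by intro he; subst he; simp at hz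
        have hp1 : 0 < a'.length := List.length_pos_of_ne_nil hne1
        have hp2 : 0 < b'.length := List.length_pos_of_ne_nil hne2
        have hmin : 0 < min a'.length b'.length := by omega
        rw [if_neg hz]
        simp only [pvTailGapL, hlen]
        have he : min a'.length b'.length + 1 - 1 = (min a'.length b'.length - 1) + 1 := by omega
        have h2 : (x :: a').getD (min a'.length b'.length + 1 - 1) ' ' = a'.getD (min a'.length b'.length - 1) ' ' := by
          rw [he]; simp
        rw [h2]
        have hne : min a'.length b'.length ≠ 0 := by omega
        simp [hne]

theorem pvDropCons (pairs : List (Char × Char)) (i : Nat) (h : i < pairs.length) :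
    pairs.drop i = pairs.getD i (' ', ' ') :: pairs.drop (i + 1) := by
  rw [List.getD_eq_getElem pairs (' ', ' ') h]
  exact List.drop_eq_getElem_cons h

theorem pvRunEnd_eq (pairs : List (Char × Char)) : ∀ (fuel j : Nat), pairs.length - j ≤ fuel →
    pvRunEnd pairs pairs.length fuel j = j + pvRunLen (pairs.drop j) := by
  intro fuel
  induction fuel with
  | zero =>
    intro j h
    rw [List.drop_eq_nil_of_le (by omega : pairs.length ≤ j)]
    simp [pvRunEnd, pvRunLen]
  | succ fuel ih =>
    intro j h
    rw [pvRunEnd]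
    by_cases hj : j < pairs.length
    · have hdrop := pvDropCons pairs j hj
      by_cases hg : pvGap (pairs.getD j (' ', ' ')).1 = true
      · rw [if_pos ⟨hj, hg⟩, ih (j + 1) (by omega), hdrop]
        simp only [pvRunLen, hg, if_true]
        omega
      · have hcond : ¬ (j < pairs.length ∧ pvGap (pairs.getD j (' ', ' ')).1 = true) := by
          intro hc; exact hg hc.2
        rw [if_neg hcond, hdrop]
        simp only [pvRunLen, hg, Bool.false_eq_true, if_false]
        omega
    · have hcond : ¬ (j < pairs.length ∧ pvGap (pairs.getD j (' ', ' ')).1 = true) := by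
        intro hc; exact hj hc.1
      rw [if_neg hcond]
      rw [List.drop_eq_nil_of_le (by omega : pairs.length ≤ j)]
      simp [pvRunLen]

theorem pvLoopB_eq_consume (m : Int) (pairs : List (Char × Char)) : ∀ (fuel i : Nat) (out : List String),
    pairs.length - i ≤ fuel →
    pvLoopB m pairs pairs.length fuel i out = pvConsume m (pairs.drop i) out := by
  intro fuel
  induction fuel with
  | zero =>
    intro i out h
    rw [List.drop_eq_nil_of_le (by omega : pairs.length ≤ i)]
    simp [pvLoopB, pvConsume]
  | succ fuel ih =>
    intro i out h
    rw [pvLoopB]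
    by_cases hi : i < pairs.length
    · have hdrop := pvDropCons pairs i hi
      by_cases hg : pvGap (pairs.getD i (' ', ' ')).1 = true
      · rw [if_pos hi, if_pos hg]
        have hk : pvRunEnd pairs pairs.length pairs.length (i + 1) = i + 1 + pvRunLen (pairs.drop (i + 1)) := by
          rw [pvRunEnd_eq pairs pairs.length (i + 1) (by omega)]
        rw [ih _ _ (by omega), hk]
        have hs : i + 1 + pvRunLen (pairs.drop (i + 1)) - i = 1 + pvRunLen (pairs.drop (i + 1)) := by
          omega
        rw [hs, hdrop]
        simp only [pvConsume, hg, if_true]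
        have hdd : pairs.drop (i + 1 + pvRunLen (pairs.drop (i + 1)))
            = (pairs.getD i (' ', ' ') :: pairs.drop (i + 1)).drop (1 + pvRunLen (pairs.drop (i + 1))) := by
          rw [Nat.add_comm 1, List.drop_succ_cons, List.drop_drop]
        rw [hdd]
      · rw [if_pos hi, if_neg hg, ih _ _ (by omega), hdrop]
        simp only [pvConsume, hg, Bool.false_eq_true, if_false]
    · rw [if_neg hi]
      rw [List.drop_eq_nil_of_le (by omega : pairs.length ≤ i)]
      simp [pvConsume]

theorem pvAltConsume (seq_i seq_j : String) (m : Int) :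
    get_unaligned_regions_alt seq_i seq_j m
      = pvConsume m (seq_i.toList.zip seq_j.toList) [] := by
  unfold get_unaligned_regions_alt
  rw [pvLoopB_eq_consume m _ (seq_i.toList.zip seq_j.toList).length 0 [] (by omega)]
  simp

theorem pvAB (seq_i seq_j : String) (m : Int) :
    get_unaligned_regions seq_i seq_j m
      = get_unaligned_regions_alt seq_i seq_j m ++ pvQ m (seq_i.toList.zip seq_j.toList) := by
  rw [pvAltConsume]
  unfold get_unaligned_regions
  exact pvMain m (seq_i.toList.zip seq_j.toList).length _ (le_refl _)

-- ===== VERDICT (by name: the statement is the Claim_ definition above) =====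
theorem get_unaligned_regions_spec : Claim_unchanged_get_unaligned_regions := by
  intro si sj m _ hnd
  show get_unaligned_regions si sj m = get_unaligned_regions_alt si sj m
  rw [pvAB]
  have hq : pvQ m (si.toList.zip sj.toList) = [] := by
    unfold pvQ
    by_cases he : pvEndsGapL (si.toList.zip sj.toList) = true
    · simp [he]
    · have htg : pvTailGapL si.toList sj.toList = false := by
        rw [← pvZip_tailGap]; simpa using he
      have hm : ¬ m ≤ 0 := fun hm0 => hnd ⟨hm0, htg⟩
      simp [he, hm]
  simp [hq]
theorem get_unaligned_regions_changed : Claim_changed_get_unaligned_regions := by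
  unfold Claim_changed_get_unaligned_regions
  refine ⟨by decide, by decide, by decide, ?_, by decide⟩
  show get_unaligned_regions_alt "A" "B" 0 = []
  rw [pvAltConsume]
  simp [pvConsume, pvGap]
theorem get_unaligned_regions_tight : Claim_exact_get_unaligned_regions := by
  intro si sj m _ hD heq
  obtain ⟨hm0, htg⟩ := hD
  have hq : pvQ m (si.toList.zip sj.toList) = [""] := by
    unfold pvQ
    rw [pvZip_tailGap, htg]
    simp [hm0]
  rw [pvAB, hq] at heq
  have := congrArg List.length heq
  simp at this
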